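-- pv_equiv track=rewrite | github.com/belajarqywok/wintrapd | src/utils/caesar.py | textnum
-- ===== SOURCE A (Python) =====
-- alpha = [chr(i) for i in range(ord('a'), ord('z') + 1)]
--
-- def textnum(text):
-- 	result = ""
-- 	for c in text:
-- 		for x, y in enumerate(alpha):
-- 			if c == y :
-- 				result += f"{x} "
-- 		if c not in alpha:
-- 			result += "| "
-- 	return result
-- ===== SOURCE B (Python) =====
-- def textnum(text):
--     parts = []
--     for c in text:
--         if 'a' <= c <= 'z':
--             parts.append(f"{ord(c) - ord('a')} ")
--         else:
--             parts.append("| ")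
--     return "".join(parts)
-- ===== Notes on version B (the rewrite author's own statement) =====
-- stated objective: faster
-- what changed: Replaces the inner scan over the alphabet list (and the separate membership re-scan) with closed-form ordinal arithmetic per character, collecting pieces in a list joined once instead of repeated string concatenation.
import Mathlib
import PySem

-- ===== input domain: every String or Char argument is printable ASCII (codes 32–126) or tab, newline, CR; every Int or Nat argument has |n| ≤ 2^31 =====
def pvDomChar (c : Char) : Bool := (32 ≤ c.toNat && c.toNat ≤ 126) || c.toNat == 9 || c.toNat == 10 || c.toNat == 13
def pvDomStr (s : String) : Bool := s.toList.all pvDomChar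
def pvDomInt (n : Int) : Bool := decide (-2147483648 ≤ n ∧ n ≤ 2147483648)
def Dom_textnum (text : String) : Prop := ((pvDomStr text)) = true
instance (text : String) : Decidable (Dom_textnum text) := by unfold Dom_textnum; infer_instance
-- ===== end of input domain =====

-- B replaces A's inner alphabet scan and membership re-scan by closed-form ordinal
-- arithmetic per character ('a' <= c <= 'z' → index = ord(c)-ord('a')), joined once.

-- ===== PORT A =====
-- alpha = [chr(i) for i in range(ord('a'), ord('z') + 1)]
def alpha : List Char := (PySem.List.pyRange 97 123 1).map (fun i => Char.ofNat i.toNat)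

def textnum (text : String) : String :=
  text.toList.foldl (fun result c =>
    let r1 := (PySem.List.enumerate alpha).foldl
      (fun r xy => if c = xy.2 then r ++ (PySem.Int.toStr xy.1 ++ " ") else r) result
    if c ∉ alpha then r1 ++ "| " else r1) ""

-- ===== PORT B =====
def textnum_alt (text : String) : String :=
  String.join (text.toList.map (fun c =>
    if 'a' ≤ c ∧ c ≤ 'z' then PySem.Int.toStr ((c.toNat : Int) - 97) ++ " " else "| "))

-- ===== PRECONDITION & SPEC =====
def Spec_textnum (text : String) (out : String) : Prop := out = textnum_alt text
instance (text : String) (out : String) : Decidable (Spec_textnum text out) := by unfold Spec_textnum; infer_instance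

-- ===== CLAIM (what is proved, stated in full; the proofs are below) =====
def Claim_equal_textnum : Prop := ∀ (text : String), Dom_textnum text → Spec_textnum text (textnum text)

-- ===== LEMMAS AND PROOFS =====
theorem toNat_inj {c d : Char} (h : c.toNat = d.toNat) : c = d :=
  Char.ext (UInt32.toNat_inj.mp h)

theorem alpha_eq : alpha = ['a','b','c','d','e','f','g','h','i','j','k','l','m','n','o','p','q','r','s','t','u','v','w','x','y','z'] := by decide

theorem step_eq (c : Char) (r : String) :
  (if c ∉ alpha then
     ((PySem.List.enumerate alpha).foldl
      (fun r xy => if c = xy.2 then r ++ (PySem.Int.toStr xy.1 ++ " ") else r) r) ++ "| "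
   else (PySem.List.enumerate alpha).foldl
      (fun r xy => if c = xy.2 then r ++ (PySem.Int.toStr xy.1 ++ " ") else r) r)
  = r ++ (if 'a' ≤ c ∧ c ≤ 'z' then PySem.Int.toStr ((c.toNat : Int) - 97) ++ " " else "| ") := by
  rw [alpha_eq]
  by_cases h : 97 ≤ c.toNat ∧ c.toNat ≤ 122
  · obtain ⟨h1, h2⟩ := h
    have hle : ('a' ≤ c ∧ c ≤ 'z') := by
      constructor <;> simp [Char.le_def, UInt32.le_iff_toNat_le] <;> omega
    rw [if_pos hle]
    set n := c.toNat with hn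
    interval_cases n
    · have hc : c = 'a' := toNat_inj (by rw [← hn]; decide)
      subst hc
      simp [PySem.List.enumerate, List.foldl, PySem.Int.toStr, PySem.Int.toChars]
    · have hc : c = 'b' := toNat_inj (by rw [← hn]; decide)
      subst hc
      simp [PySem.List.enumerate, List.foldl, PySem.Int.toStr, PySem.Int.toChars]
    · have hc : c = 'c' := toNat_inj (by rw [← hn]; decide)
      subst hc
      simp [PySem.List.enumerate, List.foldl, PySem.Int.toStr, PySem.Int.toChars]
    · have hc : c = 'd' := toNat_inj (by rw [← hn]; decide)
      subst hc
      simp [PySem.List.enumerate, List.foldl, PySem.Int.toStr, PySem.Int.toChars]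
    · have hc : c = 'e' := toNat_inj (by rw [← hn]; decide)
      subst hc
      simp [PySem.List.enumerate, List.foldl, PySem.Int.toStr, PySem.Int.toChars]
    · have hc : c = 'f' := toNat_inj (by rw [← hn]; decide)
      subst hc
      simp [PySem.List.enumerate, List.foldl, PySem.Int.toStr, PySem.Int.toChars]
    · have hc : c = 'g' := toNat_inj (by rw [← hn]; decide)
      subst hc
      simp [PySem.List.enumerate, List.foldl, PySem.Int.toStr, PySem.Int.toChars]
    · have hc : c = 'h' := toNat_inj (by rw [← hn]; decide)
      subst hc
      simp [PySem.List.enumerate, List.foldl, PySem.Int.toStr, PySem.Int.toChars]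
    · have hc : c = 'i' := toNat_inj (by rw [← hn]; decide)
      subst hc
      simp [PySem.List.enumerate, List.foldl, PySem.Int.toStr, PySem.Int.toChars]
    · have hc : c = 'j' := toNat_inj (by rw [← hn]; decide)
      subst hc
      simp [PySem.List.enumerate, List.foldl, PySem.Int.toStr, PySem.Int.toChars]
    · have hc : c = 'k' := toNat_inj (by rw [← hn]; decide)
      subst hc
      simp [PySem.List.enumerate, List.foldl, PySem.Int.toStr, PySem.Int.toChars]
    · have hc : c = 'l' := toNat_inj (by rw [← hn]; decide)
      subst hc
      simp [PySem.List.enumerate, List.foldl, PySem.Int.toStr, PySem.Int.toChars]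
    · have hc : c = 'm' := toNat_inj (by rw [← hn]; decide)
      subst hc
      simp [PySem.List.enumerate, List.foldl, PySem.Int.toStr, PySem.Int.toChars]
    · have hc : c = 'n' := toNat_inj (by rw [← hn]; decide)
      subst hc
      simp [PySem.List.enumerate, List.foldl, PySem.Int.toStr, PySem.Int.toChars]
    · have hc : c = 'o' := toNat_inj (by rw [← hn]; decide)
      subst hc
      simp [PySem.List.enumerate, List.foldl, PySem.Int.toStr, PySem.Int.toChars]
    · have hc : c = 'p' := toNat_inj (by rw [← hn]; decide)
      subst hc
      simp [PySem.List.enumerate, List.foldl, PySem.Int.toStr, PySem.Int.toChars]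
    · have hc : c = 'q' := toNat_inj (by rw [← hn]; decide)
      subst hc
      simp [PySem.List.enumerate, List.foldl, PySem.Int.toStr, PySem.Int.toChars]
    · have hc : c = 'r' := toNat_inj (by rw [← hn]; decide)
      subst hc
      simp [PySem.List.enumerate, List.foldl, PySem.Int.toStr, PySem.Int.toChars]
    · have hc : c = 's' := toNat_inj (by rw [← hn]; decide)
      subst hc
      simp [PySem.List.enumerate, List.foldl, PySem.Int.toStr, PySem.Int.toChars]
    · have hc : c = 't' := toNat_inj (by rw [← hn]; decide)
      subst hc
      simp [PySem.List.enumerate, List.foldl, PySem.Int.toStr, PySem.Int.toChars]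
    · have hc : c = 'u' := toNat_inj (by rw [← hn]; decide)
      subst hc
      simp [PySem.List.enumerate, List.foldl, PySem.Int.toStr, PySem.Int.toChars]
    · have hc : c = 'v' := toNat_inj (by rw [← hn]; decide)
      subst hc
      simp [PySem.List.enumerate, List.foldl, PySem.Int.toStr, PySem.Int.toChars]
    · have hc : c = 'w' := toNat_inj (by rw [← hn]; decide)
      subst hc
      simp [PySem.List.enumerate, List.foldl, PySem.Int.toStr, PySem.Int.toChars]
    · have hc : c = 'x' := toNat_inj (by rw [← hn]; decide)
      subst hc
      simp [PySem.List.enumerate, List.foldl, PySem.Int.toStr, PySem.Int.toChars]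
    · have hc : c = 'y' := toNat_inj (by rw [← hn]; decide)
      subst hc
      simp [PySem.List.enumerate, List.foldl, PySem.Int.toStr, PySem.Int.toChars]
    · have hc : c = 'z' := toNat_inj (by rw [← hn]; decide)
      subst hc
      simp [PySem.List.enumerate, List.foldl, PySem.Int.toStr, PySem.Int.toChars]
  · have hnot : c ∉ (['a','b','c','d','e','f','g','h','i','j','k','l','m','n','o','p','q','r','s','t','u','v','w','x','y','z'] : List Char) := by
      intro hm
      fin_cases hm <;> revert h <;> decide
    have hle : ¬ ('a' ≤ c ∧ c ≤ 'z') := by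
      rintro ⟨h1, h2⟩
      apply h
      simp [Char.le_def, UInt32.le_iff_toNat_le] at h1 h2
      omega
    rw [if_neg hle, if_pos hnot]
    congr 1
    have key : ∀ (l : List (Int × Char)) (r : String), (∀ p ∈ l, c ≠ p.2) →
        List.foldl (fun r xy => if c = xy.2 then r ++ (PySem.Int.toStr xy.1 ++ " ") else r) r l = r := by
      intro l
      induction l with
      | nil => intro r _; rfl
      | cons p ps ih =>
        intro r hp
        simp only [List.foldl, if_neg (hp p (List.mem_cons_self))]
        exact ih r (fun q hq => hp q (List.mem_cons_of_mem _ hq))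
    apply key
    intro p hp he
    apply hnot
    have : p.2 ∈ (PySem.List.enumerate (['a','b','c','d','e','f','g','h','i','j','k','l','m','n','o','p','q','r','s','t','u','v','w','x','y','z'] : List Char) 0).map Prod.snd :=
      List.mem_map_of_mem hp
    rw [PySem.List.map_snd_enumerate] at this
    exact he ▸ this

theorem join_foldl (l : List String) (a : String) :
    List.foldl (fun r s => r ++ s) a l = a ++ String.join l := by
  induction l generalizing a with
  | nil => simp [String.join]
  | cons x xs ih =>
    rw [List.foldl_cons, ih]
    have hx : String.join (x :: xs) = x ++ String.join xs := by
      show List.foldl (fun r s => r ++ s) ("" ++ x) xs = _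
      rw [ih, String.empty_append]
    rw [hx, String.append_assoc]

theorem fold_eq (l : List Char) (r : String) :
    l.foldl (fun result c =>
      let r1 := (PySem.List.enumerate alpha).foldl
        (fun r xy => if c = xy.2 then r ++ (PySem.Int.toStr xy.1 ++ " ") else r) result
      if c ∉ alpha then r1 ++ "| " else r1) r
    = r ++ String.join (l.map (fun c =>
        if 'a' ≤ c ∧ c ≤ 'z' then PySem.Int.toStr ((c.toNat : Int) - 97) ++ " " else "| ")) := by
  induction l generalizing r with
  | nil => simp [String.join]
  | cons c cs ih =>
    simp only [List.foldl, List.map, String.join, List.foldl_cons]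
    rw [step_eq c r, ih, join_foldl, String.empty_append, String.append_assoc]

-- ===== VERDICT (by name: the statement is the Claim_ definition above) =====
theorem textnum_spec : Claim_equal_textnum := by
  intro text _
  unfold Spec_textnum textnum textnum_alt
  exact fold_eq text.toList ""
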